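-- pv_equiv track=rewrite | github.com/PaarthIyer/advent-of-code | advent-of-code-2024/day2/problem2.py | valid_report
-- ===== SOURCE A (Python) =====
-- def is_sorted(ls):
--     return (sorted(ls) == ls) or (sorted(ls, reverse=True) == ls)
--
-- def valid_report(report):
--     if not is_sorted(report):
--         return False
--     for i in range(len(report) - 1):
--         diff = abs(report[i] - report[i + 1])
--         if diff < 1 or diff > 3:
--             return False
--     return True
-- ===== SOURCE B (Python) =====
-- def valid_report(report):
--     diffs = [b - a for a, b in zip(report, report[1:])]
--     return all(1 <= d <= 3 for d in diffs) or all(-3 <= d <= -1 for d in diffs)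
-- ===== Notes on version B (the rewrite author's own statement) =====
-- stated objective: alternative
-- what changed: A sorts the list twice (ascending and descending) to test monotonicity and then runs a separate index loop over abs differences; B makes one pass over adjacent differences and checks they are all in 1..3 or all in -3..-1, with no sorting or indexing.
import Mathlib
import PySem

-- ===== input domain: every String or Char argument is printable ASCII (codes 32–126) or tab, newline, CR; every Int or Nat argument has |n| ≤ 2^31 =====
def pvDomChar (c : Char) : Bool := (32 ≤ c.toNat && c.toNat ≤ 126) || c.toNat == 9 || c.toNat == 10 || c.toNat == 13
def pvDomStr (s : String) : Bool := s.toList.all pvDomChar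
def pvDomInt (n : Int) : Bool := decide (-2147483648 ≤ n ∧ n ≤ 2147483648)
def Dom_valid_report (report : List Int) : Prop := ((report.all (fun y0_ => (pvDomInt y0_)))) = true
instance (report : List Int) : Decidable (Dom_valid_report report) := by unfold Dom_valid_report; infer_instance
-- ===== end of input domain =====

-- B replaces A's two full sorts plus an index loop by one pass over adjacent
-- differences (all in 1..3 or all in -3..-1); objective: alternative.

-- ===== PORT A =====
def pvIsSorted (ls : List Int) : Bool :=
  (PySem.List.sorted ls (fun x => x) false == ls) || (PySem.List.sorted ls (fun x => x) true == ls)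

def pvLoopA (report : List Int) : List Int → Bool
  | [] => true
  | i :: rest =>
    let diff : Int := |PySem.List.pyGetD report i 0 - PySem.List.pyGetD report (i + 1) 0|
    if diff < 1 ∨ diff > 3 then false else pvLoopA report rest

def valid_report (report : List Int) : Bool :=
  if !pvIsSorted report then false
  else pvLoopA report (PySem.List.pyRange 0 ((report.length : Int) - 1) 1)

-- ===== PORT B =====
def valid_report_alt (report : List Int) : Bool :=
  let diffs := (report.zip (report.drop 1)).map (fun p => p.2 - p.1)
  diffs.all (fun d => 1 ≤ d && d ≤ 3) || diffs.all (fun d => -3 ≤ d && d ≤ -1)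

-- ===== PRECONDITION & SPEC =====
def Spec_valid_report (report : List Int) (out : Bool) : Prop := out = valid_report_alt report
instance (report : List Int) (out : Bool) : Decidable (Spec_valid_report report out) := by unfold Spec_valid_report; infer_instance

-- ===== CLAIM (what is proved, stated in full; the proofs are below) =====
def Claim_equal_valid_report : Prop := ∀ (report : List Int), Dom_valid_report report → Spec_valid_report report (valid_report report)

-- ===== LEMMAS AND PROOFS =====

theorem pvPairwise_iff_zip {R : Int → Int → Prop} (ht : ∀ a b c, R a b → R b c → R a c) :
    ∀ (xs : List Int), xs.Pairwise R ↔ ∀ p ∈ xs.zip (xs.drop 1), R p.1 p.2 := by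
  intro xs
  induction xs with
  | nil => simp
  | cons a t ih =>
    cases t with
    | nil => simp
    | cons b t' =>
      rw [List.pairwise_cons]
      constructor
      · rintro ⟨h1, h2⟩ p hp
        rw [List.drop_one, List.tail_cons, List.zip_cons_cons, List.mem_cons] at hp
        rcases hp with rfl | hp
        · exact h1 b (by simp)
        · exact ih.mp h2 p (by simpa using hp)
      · intro h
        have hab : R a b := h (a, b) (by simp)
        have hbt : (b :: t').Pairwise R := by
          refine ih.mpr ?_
          intro p hp
          refine h p ?_
          rw [List.drop_one, List.tail_cons, List.zip_cons_cons, List.mem_cons]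
          right; simpa using hp
        refine ⟨?_, hbt⟩
        intro x hx
        rcases List.mem_cons.mp hx with rfl | hx
        · exact hab
        · exact ht a b x hab ((List.pairwise_cons.mp hbt).1 x hx)

theorem pvSorted_asc_iff (xs : List Int) :
    (PySem.List.sorted xs (fun x => x) false == xs) = true ↔ xs.Pairwise (· ≤ ·) := by
  rw [beq_iff_eq]
  constructor
  · intro h
    have := PySem.List.sorted_pairwise xs (fun x => x)
    rw [h] at this; exact this
  · intro h; exact PySem.List.sorted_eq_self_of_pairwise _ _ h

theorem pvSorted_desc_iff (xs : List Int) :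
    (PySem.List.sorted xs (fun x => x) true == xs) = true ↔ xs.Pairwise (fun a b => b ≤ a) := by
  rw [beq_iff_eq]
  constructor
  · intro h
    have := PySem.List.sorted_pairwise_rev xs (fun x => x)
    rw [h] at this; exact this
  · intro h; exact PySem.List.sorted_rev_eq_self_of_pairwise _ _ h

theorem pvLoopA_eq_all (report : List Int) (is : List Int) :
    pvLoopA report is = is.all (fun i =>
      decide (1 ≤ |PySem.List.pyGetD report i 0 - PySem.List.pyGetD report (i + 1) 0| ∧
              |PySem.List.pyGetD report i 0 - PySem.List.pyGetD report (i + 1) 0| ≤ 3)) := by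
  induction is with
  | nil => simp [pvLoopA]
  | cons i rest ih =>
    simp only [pvLoopA, List.all_cons, ih]
    split_ifs with h
    · simp only [Bool.false_eq, Bool.and_eq_false_iff, decide_eq_false_iff_not]
      left; omega
    · have : (1 : Int) ≤ |PySem.List.pyGetD report i 0 - PySem.List.pyGetD report (i + 1) 0| ∧
             |PySem.List.pyGetD report i 0 - PySem.List.pyGetD report (i + 1) 0| ≤ 3 := by omega
      simp [this]

theorem pvAll_idx_eq_all_zip (f : Int → Int → Bool) :
    ∀ (xs : List Int),
      (List.range (xs.length - 1)).all (fun k => f (xs.getD k 0) (xs.getD (k + 1) 0))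
        = (xs.zip (xs.drop 1)).all (fun p => f p.1 p.2) := by
  intro xs
  induction xs with
  | nil => simp
  | cons a t ih =>
    cases t with
    | nil => simp
    | cons b t' =>
      have hlen : (a :: b :: t').length - 1 = t'.length + 1 := by simp
      rw [hlen, List.range_succ_eq_map, List.all_cons, List.all_map]
      have ih' := ih
      simp only [List.length_cons, Nat.add_sub_cancel] at ih'
      rw [List.drop_one, List.tail_cons, List.zip_cons_cons, List.all_cons]
      simp only [List.getD_cons_zero, List.getD_cons_succ]
      rw [List.drop_one, List.tail_cons] at ih'
      rw [← ih']
      congr 1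

theorem pvA_char (report : List Int) :
    valid_report report = true ↔
      ((∀ p ∈ report.zip (report.drop 1), p.1 ≤ p.2) ∨
       (∀ p ∈ report.zip (report.drop 1), p.2 ≤ p.1)) ∧
      (∀ p ∈ report.zip (report.drop 1), 1 ≤ |p.1 - p.2| ∧ |p.1 - p.2| ≤ 3) := by
  unfold valid_report
  have hstep : (PySem.List.pyRange 0 ((report.length : Int) - 1) 1).all
      (fun i => decide (1 ≤ |PySem.List.pyGetD report i 0 - PySem.List.pyGetD report (i + 1) 0| ∧
        |PySem.List.pyGetD report i 0 - PySem.List.pyGetD report (i + 1) 0| ≤ 3))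
      = (report.zip (report.drop 1)).all (fun p => decide (1 ≤ |p.1 - p.2| ∧ |p.1 - p.2| ≤ 3)) := by
    rw [PySem.List.pyRange_one]
    have h : ((report.length : Int) - 1 - 0).toNat = report.length - 1 := by omega
    rw [h, List.all_map]
    rw [← pvAll_idx_eq_all_zip (fun a b => decide (1 ≤ |a - b| ∧ |a - b| ≤ 3)) report]
    congr 1
    funext k
    have h1 : ((k : Int) + 1) = ((k + 1 : Nat) : Int) := by push_cast; ring
    simp only [Function.comp, zero_add, h1, PySem.List.pyGetD_natCast]
  rw [pvLoopA_eq_all, hstep]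
  cases hs : pvIsSorted report with
  | false =>
    simp only [Bool.not_false]
    unfold pvIsSorted at hs
    rw [Bool.or_eq_false_iff] at hs
    constructor
    · intro h; cases h
    · rintro ⟨hdir, _⟩
      exfalso
      rcases hdir with hd | hd
      · have : (PySem.List.sorted report (fun x => x) false == report) = true :=
          (pvSorted_asc_iff report).mpr
            ((pvPairwise_iff_zip (R := fun a b => a ≤ b) (fun a b c h1 h2 => le_trans h1 h2) report).mpr hd)
        rw [hs.1] at this; cases this
      · have : (PySem.List.sorted report (fun x => x) true == report) = true :=
          (pvSorted_desc_iff report).mpr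
            ((pvPairwise_iff_zip (R := fun a b => b ≤ a) (fun a b c h1 h2 => le_trans h2 h1) report).mpr hd)
        rw [hs.2] at this; cases this
  | true =>
    simp only [Bool.not_true, Bool.false_eq_true, if_false, List.all_eq_true,
      decide_eq_true_eq]
    unfold pvIsSorted at hs
    rw [Bool.or_eq_true] at hs
    constructor
    · intro h
      refine ⟨?_, h⟩
      rcases hs with hd | hd
      · exact Or.inl ((pvPairwise_iff_zip (R := fun a b => a ≤ b) (fun a b c h1 h2 => le_trans h1 h2) report).mp
          ((pvSorted_asc_iff report).mp hd))
      · exact Or.inr ((pvPairwise_iff_zip (R := fun a b => b ≤ a)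
          (fun a b c h1 h2 => le_trans h2 h1) report).mp ((pvSorted_desc_iff report).mp hd))
    · rintro ⟨_, h⟩; exact h

theorem pvB_char (report : List Int) :
    valid_report_alt report = true ↔
      (∀ p ∈ report.zip (report.drop 1), 1 ≤ p.2 - p.1 ∧ p.2 - p.1 ≤ 3) ∨
      (∀ p ∈ report.zip (report.drop 1), -3 ≤ p.2 - p.1 ∧ p.2 - p.1 ≤ -1) := by
  simp [valid_report_alt, List.all_map]

-- ===== VERDICT (by name: the statement is the Claim_ definition above) =====
theorem valid_report_spec : Claim_equal_valid_report := by
  intro report _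
  unfold Spec_valid_report
  rw [Bool.eq_iff_iff, pvA_char, pvB_char]
  constructor
  · rintro ⟨hdir, hrng⟩
    rcases hdir with hd | hd
    · left; intro p hp
      have h1 := hd p hp; have h2 := hrng p hp
      rcases abs_cases (p.1 - p.2) with ⟨he, _⟩ | ⟨he, _⟩ <;> omega
    · right; intro p hp
      have h1 := hd p hp; have h2 := hrng p hp
      rcases abs_cases (p.1 - p.2) with ⟨he, _⟩ | ⟨he, _⟩ <;> omega
  · rintro (h | h)
    · refine ⟨Or.inl fun p hp => ?_, fun p hp => ?_⟩
      · have := h p hp; omega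
      · have := h p hp
        rcases abs_cases (p.1 - p.2) with ⟨he, _⟩ | ⟨he, _⟩ <;> omega
    · refine ⟨Or.inr fun p hp => ?_, fun p hp => ?_⟩
      · have := h p hp; omega
      · have := h p hp
        rcases abs_cases (p.1 - p.2) with ⟨he, _⟩ | ⟨he, _⟩ <;> omega
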